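-- pv_equiv track=rewrite | github.com/Thomas11411/Python-LeetCode | 1874-form-array-by-concatenating-subarrays-of-another-array/1874-form-array-by-concatenating-subarrays-of-another-array.py | canChoose
-- ===== SOURCE A (Python) =====
-- from typing import List
--
-- def canChoose(groups: List[List[int]], nums: List[int]) -> bool:
--     now = 0
--     for i in groups:
--         for j in range(now,len(nums)-len(i)+1):
--             if nums[j:j+len(i)] == i:
--                 now = j + len(i)
--                 break
--         else:
--             return False
--     return True
-- ===== SOURCE B (Python) =====
-- from typing import List
--
-- def canChoose(groups: List[List[int]], nums: List[int]) -> bool: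
--     n = len(nums)
--     pos = 0
--     for g in groups:
--         m = len(g)
--         if m == 0:
--             continue
--         # longest proper border of each prefix g[:k], computed directly from the definition
--         fail = [0] * (m + 1)
--         for k in range(2, m + 1):
--             b = k - 1
--             while g[:b] != g[k - b:k]:
--                 b -= 1
--             fail[k] = b
--         # MP scan: find first occurrence of g at or after pos in linear time
--         j, k = pos, 0
--         while j < n and k < m:
--             if nums[j] == g[k]:
--                 j += 1
--                 k += 1
--             elif k > 0:
--                 k = fail[k]
--             else:
--                 j += 1
--         if k < m:
--             return False
--         pos = j
--     return True
-- ===== Notes on version B (the rewrite author's own statement) =====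
-- stated objective: faster
-- what changed: Replaces A's naive search (re-comparing a full slice at every candidate start for each group) with a Morris-Pratt matcher: per group a failure (longest proper border) table is precomputed and nums is scanned left to right without backing up the text pointer.
import Mathlib
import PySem

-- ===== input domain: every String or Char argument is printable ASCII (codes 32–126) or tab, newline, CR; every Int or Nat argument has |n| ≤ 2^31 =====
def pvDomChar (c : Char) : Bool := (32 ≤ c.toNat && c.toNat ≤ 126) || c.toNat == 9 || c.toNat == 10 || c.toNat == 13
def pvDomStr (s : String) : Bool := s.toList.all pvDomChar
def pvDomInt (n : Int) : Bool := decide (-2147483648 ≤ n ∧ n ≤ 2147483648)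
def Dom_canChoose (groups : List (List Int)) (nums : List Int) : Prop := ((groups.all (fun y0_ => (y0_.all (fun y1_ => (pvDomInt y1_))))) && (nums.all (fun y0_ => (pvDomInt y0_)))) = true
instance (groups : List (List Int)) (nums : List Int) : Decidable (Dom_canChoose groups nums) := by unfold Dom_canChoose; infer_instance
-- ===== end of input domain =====

-- B replaces A's per-group rescanning (a fresh slice comparison at every candidate start) by a
-- Morris–Pratt matcher with a precomputed failure table, scanning nums left to right.

-- ===== PORT A =====
-- inner `for j in range(...)` with break/else: first j whose slice matches, returning the new `now`
def pvInnerA (nums g : List Int) : List Int → Option Int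
  | [] => none
  | j :: js =>
      if PySem.List.slice nums (some j) (some (j + (g.length : Int))) = g
      then some (j + (g.length : Int))
      else pvInnerA nums g js

def pvLoopA (nums : List Int) : List (List Int) → Int → Bool
  | [], _ => true
  | g :: gs, now =>
      match pvInnerA nums g (PySem.List.pyRange now ((nums.length : Int) - (g.length : Int) + 1) 1) with
      | some now' => pvLoopA nums gs now'
      | none => false

def canChoose (groups : List (List Int)) (nums : List Int) : Bool :=
  pvLoopA nums groups 0

-- ===== PORT B =====
-- `b = k-1; while g[:b] != g[k-b:k]: b -= 1; return b`  (b stays ≥ 0: b = 0 always matches)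
def pvBorder (g : List Int) (k : Nat) : Nat → Nat
  | 0 => 0
  | b + 1 =>
      if PySem.List.slice g none (some ((b : Int) + 1))
           = PySem.List.slice g (some ((k : Int) - ((b : Int) + 1))) (some (k : Int))
      then b + 1
      else pvBorder g k b

-- `fail = [0, 0] + [border(g, k) for k in range(2, m + 1)]`; all these loop variables stay ≥ 0,
-- so range(2, m+1) is ported as List.range' 2 (m-1) over Nat (exact for this nonnegative range)
def pvFail (g : List Int) : List Nat :=
  [0, 0] ++ (List.range' 2 (g.length - 1)).map (fun k => pvBorder g k (k - 1))

-- the MP scan `while j < n and k < m: ...`; the fuel only makes the while loop structurally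
-- terminating and is supplied large enough to never run out; every list index read here is
-- in range, so getD is exact
def pvMp (nums g : List Int) (fail : List Nat) : Nat → Nat → Nat → Nat × Nat
  | 0, j, k => (j, k)
  | fuel + 1, j, k =>
      if j < nums.length ∧ k < g.length then
        if nums.getD j 0 = g.getD k 0 then pvMp nums g fail fuel (j + 1) (k + 1)
        else if 0 < k then pvMp nums g fail fuel j (fail.getD k 0)
        else pvMp nums g fail fuel (j + 1) k
      else (j, k)

def pvLoopB (nums : List Int) : List (List Int) → Nat → Bool
  | [], _ => true
  | g :: gs, pos =>
      if g.length = 0 then pvLoopB nums gs pos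
      else
        let r := pvMp nums g (pvFail g) ((nums.length + 1) * (g.length + 1)) pos 0
        if r.2 < g.length then false else pvLoopB nums gs r.1

def canChoose_alt (groups : List (List Int)) (nums : List Int) : Bool :=
  pvLoopB nums groups 0

-- ===== PRECONDITION & SPEC =====
def Spec_canChoose (groups : List (List Int)) (nums : List Int) (out : Bool) : Prop := out = canChoose_alt groups nums
instance (groups : List (List Int)) (nums : List Int) (out : Bool) : Decidable (Spec_canChoose groups nums out) := by unfold Spec_canChoose; infer_instance

-- ===== CLAIM (what is proved, stated in full; the proofs are below) =====
def Claim_equal_canChoose : Prop := ∀ (groups : List (List Int)) (nums : List Int), Dom_canChoose groups nums → Spec_canChoose groups nums (canChoose groups nums)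

-- ===== LEMMAS AND PROOFS =====

-- an occurrence of g starting at i (forces i + g.length ≤ nums.length once g ≠ [])
def pvOcc (nums g : List Int) (i : Nat) : Prop := (nums.drop i).take g.length = g

-- the first occurrence of g at or after s: the reference both ports are reduced to
def pvFind (nums g : List Int) (s : Nat) : Option Nat :=
  if h : s + g.length ≤ nums.length then
    if (nums.drop s).take g.length = g then some s else pvFind nums g (s + 1)
  else none
termination_by nums.length + 1 - s
decreasing_by omega

-- b is a border of g.take k: the prefix of length b equals the suffix of length b
def pvBcond (g : List Int) (k b : Nat) : Prop := g.take b = (g.drop (k - b)).take b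

lemma pvOcc_le {nums g : List Int} {i : Nat} (hg : 0 < g.length) (h : pvOcc nums g i) :
    i + g.length ≤ nums.length := by
  have := congrArg List.length h
  simp only [List.length_take, List.length_drop] at this
  omega

lemma pvFind_none {nums g : List Int} {s : Nat}
    (h : ∀ i, s ≤ i → ¬ pvOcc nums g i) : pvFind nums g s = none := by
  fun_induction pvFind nums g s with
  | case1 s hle hocc => exact absurd hocc (h s le_rfl)
  | case2 s hle hocc ih => exact ih (fun i hi => h i (by omega))
  | case3 s hle => rfl

lemma pvFind_some {nums g : List Int} {s i : Nat} (hn : i + g.length ≤ nums.length)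
    (hsi : s ≤ i) (hocc : pvOcc nums g i)
    (hmin : ∀ t, s ≤ t → t < i → ¬ pvOcc nums g t) : pvFind nums g s = some i := by
  fun_induction pvFind nums g s with
  | case1 s hle hocc' =>
      have : s = i := by
        by_contra hne
        exact hmin s le_rfl (by omega) hocc'
      simp [this]
  | case2 s hle hocc' ih =>
      have hne : s ≠ i := fun he => hocc' (he ▸ hocc)
      exact ih (by omega) (fun t ht => hmin t (by omega))
  | case3 s hle => omega

-- A's inner loop computes the first occurrence (and returns its end position)
lemma pvInnerA_eq (nums g : List Int) (s : Nat) :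
    pvInnerA nums g (PySem.List.pyRange (s : Int) ((nums.length : Int) - (g.length : Int) + 1) 1)
      = (pvFind nums g s).map (fun i => ((i : Int) + (g.length : Int))) := by
  fun_induction pvFind nums g s with
  | case1 s hle hocc =>
      rw [PySem.List.pyRange_one_cons (by omega)]
      simp only [pvInnerA, PySem.List.slice_natCast_add, if_pos hocc]
      simp
  | case2 s hle hocc ih =>
      rw [PySem.List.pyRange_one_cons (by omega)]
      simp only [pvInnerA, PySem.List.slice_natCast_add, if_neg hocc]
      rw [show ((s : Int) + 1) = (((s + 1 : Nat)) : Int) by push_cast; ring]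
      exact ih
  | case3 s hle =>
      rw [PySem.List.pyRange_one_eq_nil (by omega)]
      rfl

-- the slice test inside pvBorder is exactly the border condition
lemma pvBorder_cond_iff (g : List Int) (k b : Nat) (hb : b + 1 ≤ k) :
    (PySem.List.slice g none (some ((b : Int) + 1))
      = PySem.List.slice g (some ((k : Int) - ((b : Int) + 1))) (some (k : Int)))
    ↔ pvBcond g k (b + 1) := by
  rw [show ((b : Int) + 1) = ((b + 1 : Nat) : Int) by push_cast; ring]
  rw [show ((k : Int) - ((b + 1 : Nat) : Int)) = ((k - (b + 1) : Nat) : Int) by omega]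
  rw [PySem.List.slice_to_natCast, PySem.List.slice_natCast]
  unfold pvBcond
  rw [show k - (k - (b + 1)) = b + 1 by omega]

lemma pvBorder_le (g : List Int) (k b : Nat) : pvBorder g k b ≤ b := by
  induction b with
  | zero => simp [pvBorder]
  | succ b ih => rw [pvBorder]; split
                 · exact le_rfl
                 · omega

lemma pvBorder_bcond (g : List Int) (k : Nat) : ∀ b, b < k → pvBcond g k (pvBorder g k b) := by
  intro b
  induction b with
  | zero => intro _; simp [pvBorder, pvBcond]
  | succ b ih =>
      intro hb
      rw [pvBorder]
      split
      · next hcond => exact (pvBorder_cond_iff g k b (by omega)).mp hcond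
      · exact ih (by omega)

lemma pvBorder_max (g : List Int) (k : Nat) : ∀ b c, b < k → c ≤ b →
    pvBcond g k c → c ≤ pvBorder g k b := by
  intro b
  induction b with
  | zero => intro c _ hc _; omega
  | succ b ih =>
      intro c hb hc h
      rw [pvBorder]
      split
      · omega
      · next hcond =>
          rcases Nat.lt_or_ge c (b + 1) with h1 | h1
          · exact ih c (by omega) (by omega) h
          · have : c = b + 1 := by omega
            subst this
            exact absurd ((pvBorder_cond_iff g k b (by omega)).mpr h) hcond

lemma pvFail_getD (g : List Int) (k : Nat) (h1 : 0 < k) (h2 : k ≤ g.length) :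
    (pvFail g).getD k 0 = pvBorder g k (k - 1) := by
  rcases Nat.lt_or_ge k 2 with hk | hk
  · interval_cases k
    rfl
  · unfold pvFail
    rw [List.getD_eq_getElem?_getD]
    rw [List.getElem?_append_right (by simp; omega)]
    simp only [List.length_cons, List.length_nil]
    rw [List.getElem?_map]
    rw [List.getElem?_range']
    simp only [Option.map_some, Option.getD_some]
    · rw [show 2 + 1 * (k - (0 + 1 + 1)) = k by omega]
    · omega

-- a matched segment restricts to matched sub-segments
lemma pvSegSuffix {nums : List Int} {s k : Nat} {t : List Int}
    (h : (nums.drop s).take k = t) (d : Nat) :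
    (nums.drop (s + d)).take (k - d) = t.drop d := by
  rw [← h, List.drop_take, List.drop_drop]

-- elementwise reading of an occurrence
lemma pvOcc_elem {nums g : List Int} {i t : Nat} (h : pvOcc nums g i) (ht : t < g.length) :
    nums[i + t]? = g[t]? := by
  unfold pvOcc at h
  have := congrArg (fun l => l[t]?) h
  simpa [List.getElem?_take_of_lt ht, List.getElem?_drop] using this

-- the MP scan finds the first occurrence at or after pos
lemma pvMp_correct (nums g : List Int) (pos : Nat) :
    ∀ fuel j k, k ≤ g.length → k ≤ j → j ≤ nums.length → pos + k ≤ j →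
      (nums.drop (j - k)).take k = g.take k →
      (∀ i, pos ≤ i → i + k < j → ¬ pvOcc nums g i) →
      (nums.length - j) * (g.length + 1) + k < fuel →
      (let r := pvMp nums g (pvFail g) fuel j k
       r.1 ≤ nums.length ∧
       ((r.2 = g.length ∧ g.length ≤ r.1 ∧ pvFind nums g pos = some (r.1 - g.length)) ∨
        (r.2 < g.length ∧ pvFind nums g pos = none))) := by
  intro fuel
  induction fuel with
  | zero => intro j k _ _ _ _ _ _ hf; omega
  | succ fuel ih =>
      intro j k hkm hkj hjn hpk hseg hno hf
      rw [pvMp]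
      by_cases hg : j < nums.length ∧ k < g.length
      · rw [if_pos hg]
        obtain ⟨hjlt, hklt⟩ := hg
        have hsplit : (nums.length - j) * (g.length + 1)
            = (nums.length - (j + 1)) * (g.length + 1) + (g.length + 1) := by
          rw [show nums.length - j = (nums.length - (j + 1)) + 1 by omega, Nat.succ_mul]
        by_cases heq : nums.getD j 0 = g.getD k 0
        · rw [if_pos heq]
          apply ih (j + 1) (k + 1) hklt (by omega) hjlt (by omega)
          · -- extended segment match
            have hjk : j + 1 - (k + 1) = j - k := by omega
            rw [hjk, List.take_add_one, List.take_add_one, ← hseg]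
            have h1 : (nums.drop (j - k))[k]? = some (nums.getD j 0) := by
              rw [List.getElem?_drop, show j - k + k = j by omega,
                List.getElem?_eq_getElem hjlt, List.getD_eq_getElem nums 0 hjlt]
            have h2 : g[k]? = some (g.getD k 0) := by
              rw [List.getElem?_eq_getElem hklt, List.getD_eq_getElem g 0 hklt]
            rw [h1, h2, heq]
          · intro i hpi hik
            exact hno i hpi (by omega)
          · rw [hsplit] at hf; omega
        · rw [if_neg heq]
          by_cases hk0 : 0 < k
          · rw [if_pos hk0]
            rw [pvFail_getD g k hk0 hkm]
            set k' := pvBorder g k (k - 1) with hk'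
            have hle : k' ≤ k - 1 := pvBorder_le g k (k - 1)
            have hbc : pvBcond g k k' := pvBorder_bcond g k (k - 1) (by omega)
            -- the current segment still matches the border
            have hseg' : (nums.drop (j - k')).take k' = g.take k' := by
              have hs := pvSegSuffix hseg (k - k')
              rw [show j - k + (k - k') = j - k' by omega,
                  show k - (k - k') = k' by omega] at hs
              rw [hs, List.drop_take, show k - (k - k') = k' by omega]
              exact hbc.symm
            apply ih j k' (by omega) (by omega) hjn (by omega) hseg'
            · -- no occurrence starts in [pos, j - k')
              intro i hpi hik
              by_cases hold : i + k < j
              · exact hno i hpi hold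
              · intro hocc
                by_cases hie : i + k = j
                · -- occurrence at j - k contradicts the mismatch
                  have hel := pvOcc_elem hocc hklt
                  rw [hie, List.getElem?_eq_getElem hjlt, List.getElem?_eq_getElem hklt] at hel
                  rw [List.getD_eq_getElem nums 0 hjlt, List.getD_eq_getElem g 0 hklt] at heq
                  exact heq (by simpa using hel)
                · -- a longer border than k' would exist
                  have ha : g.take (j - i) = (nums.drop i).take (j - i) := by
                    have hc := congrArg (fun l => l.take (j - i)) hocc.symm
                    simpa [List.take_take, Nat.min_eq_left (by omega : j - i ≤ g.length)] using hc
                  have hb : (nums.drop i).take (j - i) = (g.take k).drop (k - (j - i)) := by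
                    have hs := pvSegSuffix hseg (i - (j - k))
                    rw [show j - k + (i - (j - k)) = i by omega,
                        show k - (i - (j - k)) = j - i by omega] at hs
                    rw [hs, show i - (j - k) = k - (j - i) by omega]
                  have hbcond : pvBcond g k (j - i) := by
                    unfold pvBcond
                    rw [ha, hb, List.drop_take, show k - (k - (j - i)) = j - i by omega]
                  have := pvBorder_max g k (k - 1) (j - i) (by omega) (by omega) hbcond
                  omega
            · omega
          · rw [if_neg hk0]
            have hk : k = 0 := by omega
            subst hk
            apply ih (j + 1) 0 (by omega) (by omega) hjlt (by omega) (by simp)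
            · intro i hpi hik
              by_cases hij : i < j
              · exact hno i hpi (by omega)
              · have hij' : i = j := by omega
                subst hij'
                intro hocc
                have hel := pvOcc_elem hocc hklt
                rw [Nat.add_zero, List.getElem?_eq_getElem hjlt,
                    List.getElem?_eq_getElem hklt] at hel
                rw [List.getD_eq_getElem nums 0 hjlt, List.getD_eq_getElem g 0 hklt] at heq
                exact heq (by simpa using hel)
            · rw [hsplit] at hf; omega
      · rw [if_neg hg]
        refine ⟨hjn, ?_⟩
        by_cases hkem : k = g.length
        · left
          refine ⟨hkem, by omega, ?_⟩
          subst hkem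
          apply pvFind_some (i := j - g.length) (by omega) (by omega)
          · unfold pvOcc
            rw [List.take_length] at hseg
            exact hseg
          · intro t hpt htl
            exact hno t hpt (by omega)
        · right
          have hklt : k < g.length := by omega
          have hjn' : j = nums.length := by
            by_contra hne
            exact hg ⟨by omega, hklt⟩
          refine ⟨hklt, pvFind_none ?_⟩
          intro i hpi hocc
          by_cases hik : i + k < j
          · exact hno i hpi hik hocc
          · have := pvOcc_le (by omega) hocc
            omega

-- per-group agreement of the two outer loops
lemma pvLoops_eq (nums : List Int) :
    ∀ gs (pos : Nat), pos ≤ nums.length → pvLoopA nums gs (pos : Int) = pvLoopB nums gs pos := by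
  intro gs
  induction gs with
  | nil => intro pos _; rfl
  | cons g gs ih =>
      intro pos hpos
      rw [pvLoopA, pvLoopB, pvInnerA_eq nums g pos]
      by_cases hm : g.length = 0
      · rw [if_pos hm]
        have hocc : pvOcc nums g pos := by
          have : g = [] := List.eq_nil_of_length_eq_zero hm
          simp [pvOcc, this]
        have hfind : pvFind nums g pos = some pos :=
          pvFind_some (by omega) le_rfl hocc (fun t ht htl => absurd htl (by omega))
        rw [hfind]
        simp only [hm, Nat.cast_zero, add_zero]
        exact ih pos hpos
      · rw [if_neg hm]
        have h0 : 0 < g.length := Nat.pos_of_ne_zero hm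
        have hfuel : (nums.length - pos) * (g.length + 1) + 0
            < (nums.length + 1) * (g.length + 1) := by
          have h1 : nums.length - pos < nums.length + 1 := by omega
          have := Nat.mul_lt_mul_of_lt_of_le h1 (le_refl (g.length + 1)) (by omega)
          omega
        have hmp := pvMp_correct nums g pos ((nums.length + 1) * (g.length + 1)) pos 0
          (by omega) (by omega) hpos (by omega) (by simp)
          (fun i _ h => absurd h (by omega)) hfuel
        set r := pvMp nums g (pvFail g) ((nums.length + 1) * (g.length + 1)) pos 0 with hr
        obtain ⟨hrn, hcase⟩ := hmp
        rcases hcase with ⟨hk2, hmle, hfind⟩ | ⟨hk2, hfind⟩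
        · rw [hfind]
          have hcast : ((r.1 - g.length : Nat) : Int) + (g.length : Int) = ((r.1 : Nat) : Int) := by
            omega
          simp only [Option.bind_eq_bind, Option.bind_some, Option.pure_def, Option.map_some, hcast]
          rw [if_neg (by omega)]
          exact ih r.1 hrn
        · rw [hfind]
          simp only [Option.bind_eq_bind, Option.bind_none, Option.map_none]
          rw [if_pos (by omega)]

-- ===== VERDICT (by name: the statement is the Claim_ definition above) =====
theorem canChoose_spec : Claim_equal_canChoose := by
  intro groups nums _
  unfold Spec_canChoose canChoose canChoose_alt
  have h := pvLoops_eq nums groups 0 (Nat.zero_le _)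
  simpa using h
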